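-- pv_equiv track=rewrite | github.com/ROMANVIKI/codeforces | round1040/subAllYouNeed.py | subFunc
-- ===== SOURCE A (Python) =====
-- def subFunc(n, arr):
--     count = 0
--     for num in arr:
--         if num > 0:
--             count += num
--         elif num == 0:
--             count += 1
--     return count
-- ===== SOURCE B (Python) =====
-- def subFunc(n, arr):
--     # Sort descending, then scan with early exit: sum the leading positives,
--     # count the following run of zeros, stop (everything after is negative).
--     s = sorted(arr, reverse=True)
--     total = 0
--     i = 0
--     while i < len(s) and s[i] > 0:
--         total += s[i]
--         i += 1
--     while i < len(s) and s[i] == 0: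
--         total += 1
--         i += 1
--     return total
-- ===== Notes on version B (the rewrite author's own statement) =====
-- stated objective: alternative
-- what changed: Replaces A's single fused if/elif accumulator pass over the whole list with sort-descending followed by an early-exit scan: sum the positive prefix, count the zero run, and stop before the negative tail.
import Mathlib
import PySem

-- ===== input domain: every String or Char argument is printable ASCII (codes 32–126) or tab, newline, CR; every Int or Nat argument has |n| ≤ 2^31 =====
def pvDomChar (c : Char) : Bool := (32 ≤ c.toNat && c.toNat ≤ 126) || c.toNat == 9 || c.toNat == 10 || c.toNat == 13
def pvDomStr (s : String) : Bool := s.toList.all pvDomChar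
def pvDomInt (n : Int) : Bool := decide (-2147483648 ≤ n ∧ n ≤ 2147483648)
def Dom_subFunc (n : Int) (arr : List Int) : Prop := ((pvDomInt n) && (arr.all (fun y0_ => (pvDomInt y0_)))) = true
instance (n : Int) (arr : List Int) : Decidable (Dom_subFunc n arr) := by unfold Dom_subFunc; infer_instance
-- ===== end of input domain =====

-- B sorts descending and scans with early exit (sum positive prefix, count zero run) instead of A's fused full-list accumulator loop; objective: alternative (sort-then-scan algorithm).


-- ===== PORT A =====
-- fused loop: count += num if num > 0, count += 1 if num == 0
def subFunc (n : Int) (arr : List Int) : Int :=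
  arr.foldl (fun count num =>
    if num > 0 then count + num
    else if num == 0 then count + 1
    else count) 0

-- ===== PORT B =====
-- first while loop: sum the leading positives of the descending-sorted list
def pvPosScan (total : Int) : List Int → Int × List Int
  | [] => (total, [])
  | x :: xs => if x > 0 then pvPosScan (total + x) xs else (total, x :: xs)

-- second while loop: count the leading zeros of the remainder
def pvZeroScan (total : Int) : List Int → Int
  | [] => total
  | x :: xs => if x == 0 then pvZeroScan (total + 1) xs else total

-- sort descending, sum positive prefix, count zero run, stop
def subFunc_alt (n : Int) (arr : List Int) : Int :=
  let s := PySem.List.sorted arr (fun x => x) true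
  let p := pvPosScan 0 s
  pvZeroScan p.1 p.2

-- ===== PRECONDITION & SPEC =====
def Spec_subFunc (n : Int) (arr : List Int) (out : Int) : Prop := out = subFunc_alt n arr
instance (n : Int) (arr : List Int) (out : Int) : Decidable (Spec_subFunc n arr out) := by unfold Spec_subFunc; infer_instance

-- ===== CLAIM (what is proved, stated in full; the proofs are below) =====
def Claim_equal_subFunc : Prop := ∀ (n : Int) (arr : List Int), Dom_subFunc n arr → Spec_subFunc n arr (subFunc n arr)

-- ===== LEMMAS AND PROOFS =====

-- A's fused fold computes the sum of g over the list, for g below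
def pvG (x : Int) : Int := if x > 0 then x else if x = 0 then 1 else 0

theorem subFunc_eq_sum_g (arr : List Int) (c : Int) :
    arr.foldl (fun count num =>
      if num > 0 then count + num
      else if num == 0 then count + 1
      else count) c = c + (arr.map pvG).sum := by
  induction arr generalizing c with
  | nil => simp
  | cons x xs ih =>
    rw [List.foldl_cons, List.map_cons, List.sum_cons]
    by_cases hx : x > 0
    · rw [if_pos hx, ih]; simp [pvG, hx]; ring
    · rw [if_neg hx]
      by_cases hz : x = 0
      · rw [if_pos (by simp [hz]), ih]; simp [pvG, hz]; ring
      · rw [if_neg (by simp [hz]), ih]; simp [pvG, hx, hz]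

theorem pvZeroScan_eq (s : List Int) (total : Int)
    (hp : s.Pairwise (fun a b => b ≤ a)) (hle : ∀ y ∈ s, y ≤ 0) :
    pvZeroScan total s = total + (s.map pvG).sum := by
  induction s generalizing total with
  | nil => simp [pvZeroScan]
  | cons x xs ih =>
    rw [List.pairwise_cons] at hp
    by_cases hz : x = 0
    · rw [pvZeroScan, if_pos (by simp [hz]),
        ih (total + 1) hp.2 (fun y hy => le_trans (hp.1 y hy) (le_of_eq hz))]
      simp [pvG, hz]; ring
    · have hxneg : x < 0 :=
        lt_of_le_of_ne (hle x (List.mem_cons_self)) hz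
      rw [pvZeroScan, if_neg (by simp [hz])]
      have hsum : ((x :: xs).map pvG).sum = 0 := by
        apply List.sum_eq_zero
        intro a ha
        rw [List.mem_map] at ha
        obtain ⟨y, hy, rfl⟩ := ha
        rcases List.mem_cons.mp hy with rfl | hy'
        · simp [pvG]; omega
        · have : y < 0 := lt_of_le_of_lt (hp.1 y hy') hxneg
          simp [pvG]; omega
      rw [hsum]; ring

theorem pvScan_eq (s : List Int) (total : Int)
    (hp : s.Pairwise (fun a b => b ≤ a)) :
    pvZeroScan (pvPosScan total s).1 (pvPosScan total s).2
      = total + (s.map pvG).sum := by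
  induction s generalizing total with
  | nil => simp [pvPosScan, pvZeroScan]
  | cons x xs ih =>
    rw [List.pairwise_cons] at hp
    by_cases hx : x > 0
    · rw [pvPosScan, if_pos hx, ih (total + x) hp.2]
      simp [pvG, hx]; ring
    · rw [pvPosScan, if_neg hx]
      exact pvZeroScan_eq (x :: xs) total (List.pairwise_cons.mpr hp)
        (fun y hy => by
          rcases List.mem_cons.mp hy with rfl | hy'
          · omega
          · exact le_trans (hp.1 y hy') (by omega))

-- ===== VERDICT (by name: the statement is the Claim_ definition above) =====
theorem subFunc_spec : Claim_equal_subFunc := by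
  intro n arr _
  unfold Spec_subFunc subFunc subFunc_alt
  rw [subFunc_eq_sum_g]
  rw [pvScan_eq _ 0 (by simpa using PySem.List.sorted_pairwise_rev arr (fun x => x))]
  have hperm : ((PySem.List.sorted arr (fun x => x) true).map pvG).Perm (arr.map pvG) :=
    (PySem.List.sorted_perm arr (fun x => x) true).map pvG
  rw [hperm.sum_eq]
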